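-- pv_equiv track=rewrite | github.com/DecodeFF/Digital_information_processing | BASIC OPERATIONS WITH SIGNALS.py | add_signals
-- ===== SOURCE A (Python) =====
-- def add_signals(signal1, signal2):
--     result_signal = []
--     min_length = min(len(signal1), len(signal2))
--     for i in range(min_length):
--         result_signal.append(signal1[i] + signal2[i])
--     result_signal.extend(signal1[min_length:])
--     result_signal.extend(signal2[min_length:])
--     return result_signal
-- ===== SOURCE B (Python) =====
-- def add_signals(signal1, signal2):
--     max_length = max(len(signal1), len(signal2))
--     result_signal = []
--     for i in range(max_length):
--         if i < len(signal1) and i < len(signal2):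
--             result_signal.append(signal1[i] + signal2[i])
--         elif i < len(signal1):
--             result_signal.append(signal1[i])
--         else:
--             result_signal.append(signal2[i])
--     return result_signal
-- ===== Notes on version B (the rewrite author's own statement) =====
-- stated objective: alternative
-- what changed: Replaces A's three-phase construction (loop over the overlap, then two slice-extends for the tails) by a single unified loop over range(max_length) that decides per index whether to sum or copy, never slicing.
import Mathlib
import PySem

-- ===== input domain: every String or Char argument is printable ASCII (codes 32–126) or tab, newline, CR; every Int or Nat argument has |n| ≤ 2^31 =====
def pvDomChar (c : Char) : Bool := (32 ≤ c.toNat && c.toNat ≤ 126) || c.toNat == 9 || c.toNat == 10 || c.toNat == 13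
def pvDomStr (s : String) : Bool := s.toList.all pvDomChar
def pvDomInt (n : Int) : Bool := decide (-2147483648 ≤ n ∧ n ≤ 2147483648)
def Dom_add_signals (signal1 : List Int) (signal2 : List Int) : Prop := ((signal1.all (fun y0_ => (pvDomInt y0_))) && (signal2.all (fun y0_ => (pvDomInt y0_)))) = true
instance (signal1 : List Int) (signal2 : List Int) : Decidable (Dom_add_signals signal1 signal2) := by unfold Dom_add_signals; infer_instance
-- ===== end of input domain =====

-- B rebuilds the result with one unified loop over range(max_length) (sum on overlap,
-- copy on the tail) instead of A's overlap loop plus two slice-extends; same cost, alternative decomposition.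
-- ===== PORT A =====
def add_signals (signal1 : List Int) (signal2 : List Int) : List Int :=
  let minLength : Int := min (signal1.length : Int) (signal2.length : Int)
  let resultSignal : List Int :=
    (PySem.List.pyRange 0 minLength).foldl
      (fun acc i => acc ++ [PySem.List.pyGetD signal1 i 0 + PySem.List.pyGetD signal2 i 0]) []
  resultSignal ++ PySem.List.slice signal1 (some minLength) none
    ++ PySem.List.slice signal2 (some minLength) none

-- ===== PORT B =====
def add_signals_alt (signal1 : List Int) (signal2 : List Int) : List Int :=
  let maxLength : Int := max (signal1.length : Int) (signal2.length : Int)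
  (PySem.List.pyRange 0 maxLength).foldl
    (fun acc i =>
      if i < (signal1.length : Int) ∧ i < (signal2.length : Int) then
        acc ++ [PySem.List.pyGetD signal1 i 0 + PySem.List.pyGetD signal2 i 0]
      else if i < (signal1.length : Int) then
        acc ++ [PySem.List.pyGetD signal1 i 0]
      else
        acc ++ [PySem.List.pyGetD signal2 i 0]) []

-- ===== PRECONDITION & SPEC =====
def Spec_add_signals (signal1 : List Int) (signal2 : List Int) (out : List Int) : Prop := out = add_signals_alt signal1 signal2
instance (signal1 : List Int) (signal2 : List Int) (out : List Int) : Decidable (Spec_add_signals signal1 signal2 out) := by unfold Spec_add_signals; infer_instance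

-- ===== CLAIM (what is proved, stated in full; the proofs are below) =====
def Claim_equal_add_signals : Prop := ∀ (signal1 : List Int) (signal2 : List Int), Dom_add_signals signal1 signal2 → Spec_add_signals signal1 signal2 (add_signals signal1 signal2)

-- ===== LEMMAS AND PROOFS =====

-- common recursive description of the result: sum on the overlap, then the remaining tail
def pvMerge : List Int → List Int → List Int
  | [], ys => ys
  | x :: xs, [] => x :: xs
  | x :: xs, y :: ys => (x + y) :: pvMerge xs ys

theorem map_getD_range (l : List Int) :
    (List.range l.length).map (fun k => l.getD k 0) = l := by
  induction l with
  | nil => simp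
  | cons x xs ih =>
    simp only [List.length_cons, List.range_succ_eq_map, List.map_cons, List.map_map,
      Function.comp_def, List.getD_cons_zero, List.getD_cons_succ]
    exact congrArg (x :: ·) ih

theorem add_signals_eq_merge (signal1 signal2 : List Int) :
    add_signals signal1 signal2 = pvMerge signal1 signal2 := by
  simp only [add_signals]
  rw [show min (signal1.length : Int) (signal2.length : Int)
        = ((min signal1.length signal2.length : Nat) : Int) by push_cast; rfl,
    PySem.List.pyRange_zero_natCast, List.foldl_map,
    PySem.List.foldl_append_singleton_eq_map,
    PySem.List.slice_from signal1 (Int.natCast_nonneg _),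
    PySem.List.slice_from signal2 (Int.natCast_nonneg _)]
  simp only [PySem.List.pyGetD_natCast, Int.toNat_natCast, List.nil_append]
  induction signal1 generalizing signal2 with
  | nil => simp [pvMerge]
  | cons x xs ih =>
    cases signal2 with
    | nil => simp [pvMerge]
    | cons y ys =>
      rw [show min (x :: xs).length (y :: ys).length = min xs.length ys.length + 1 by
            simp only [List.length_cons]; omega,
        List.range_succ_eq_map, List.map_cons, List.map_map]
      simp only [Function.comp_def, List.getD_cons_zero, List.getD_cons_succ,
        List.drop_succ_cons, pvMerge, List.cons_append]
      exact congrArg ((x + y) :: ·) (ih ys)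

theorem add_signals_alt_eq_merge (signal1 signal2 : List Int) :
    add_signals_alt signal1 signal2 = pvMerge signal1 signal2 := by
  simp only [add_signals_alt]
  rw [show max (signal1.length : Int) (signal2.length : Int)
        = ((max signal1.length signal2.length : Nat) : Int) by push_cast; rfl,
    PySem.List.pyRange_zero_natCast, List.foldl_map]
  have hbody : (fun (acc : List Int) (k : Nat) =>
      if ((k : Int) < (signal1.length : Int) ∧ (k : Int) < (signal2.length : Int)) then
        acc ++ [PySem.List.pyGetD signal1 (k : Int) 0 + PySem.List.pyGetD signal2 (k : Int) 0]
      else if (k : Int) < (signal1.length : Int) then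
        acc ++ [PySem.List.pyGetD signal1 (k : Int) 0]
      else
        acc ++ [PySem.List.pyGetD signal2 (k : Int) 0])
      = (fun acc k => acc ++
          [if (k < signal1.length ∧ k < signal2.length) then
             signal1.getD k 0 + signal2.getD k 0
           else if k < signal1.length then signal1.getD k 0 else signal2.getD k 0]) := by
    funext acc k
    simp only [PySem.List.pyGetD_natCast, Nat.cast_lt]
    split_ifs <;> rfl
  rw [hbody, PySem.List.foldl_append_singleton_eq_map]
  simp only [List.nil_append]
  clear hbody
  induction signal1 generalizing signal2 with
  | nil =>
    simp only [List.length_nil, Nat.max_eq_right (Nat.zero_le _), pvMerge]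
    calc (List.range signal2.length).map _
        = (List.range signal2.length).map (fun k => signal2.getD k 0) := by
          refine List.map_congr_left (fun k _ => ?_)
          rw [if_neg (fun h => Nat.not_lt_zero k h.1), if_neg (Nat.not_lt_zero k)]
      _ = signal2 := map_getD_range signal2
  | cons x xs ih =>
    cases signal2 with
    | nil =>
      simp only [List.length_nil, Nat.max_eq_left (Nat.zero_le _), pvMerge]
      calc (List.range (x :: xs).length).map _
          = (List.range (x :: xs).length).map (fun k => (x :: xs).getD k 0) := by
            refine List.map_congr_left (fun k hk => ?_)
            rw [if_neg (fun h => Nat.not_lt_zero k h.2),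
              if_pos (List.mem_range.mp hk)]
        _ = x :: xs := map_getD_range (x :: xs)
    | cons y ys =>
      rw [show max (x :: xs).length (y :: ys).length = max xs.length ys.length + 1 by
            simp only [List.length_cons]; omega,
        List.range_succ_eq_map, List.map_cons, List.map_map]
      rw [if_pos ⟨Nat.succ_pos _, Nat.succ_pos _⟩]
      simp only [List.getD_cons_zero, pvMerge, Function.comp_def, List.getD_cons_succ,
        List.length_cons, Nat.succ_eq_add_one, Nat.add_lt_add_iff_right]
      exact congrArg ((x + y) :: ·) (ih ys)

-- ===== VERDICT (by name: the statement is the Claim_ definition above) =====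
theorem add_signals_spec : Claim_equal_add_signals := by
  intro signal1 signal2 _
  unfold Spec_add_signals
  rw [add_signals_eq_merge, add_signals_alt_eq_merge]
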